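-- pv_equiv track=rewrite | github.com/adventcoder/adventofcode-2023 | day11.py | distance_sum_major
-- ===== SOURCE A (Python) =====
-- def distance_sum_major(grid, factor):
--     N = 0
--     S1 = 0
--     S2 = 0
--     y = 0
--     for row in grid:
--         n = row.count('#')
--         N += n
--         S1 += (2*N - n)*n*y
--         S2 += n*y
--         y += factor if n == 0 else 1
--     return S1 - N*S2
-- ===== SOURCE B (Python) =====
-- def distance_sum_major(grid, factor):
--     # First pass: explicit expanded coordinates, one per galaxy.
--     coords = []
--     y = 0
--     for row in grid:
--         n = row.count('#')
--         coords += [y] * n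
--         y += factor if n == 0 else 1
--     # Second pass: sum of (later - earlier) over all pairs; coordinates are
--     # listed in scan order, so this is the expanded pairwise distance sum.
--     total = 0
--     for i, c in enumerate(coords):
--         for d in coords[i+1:]:
--             total += d - c
--     return total
-- ===== Notes on version B (the rewrite author's own statement) =====
-- stated objective: alternative
-- what changed: B materialises the expanded galaxy coordinates as an explicit list and sums later-minus-earlier over all pairs with a nested scan, instead of A's single pass of closed-form running aggregates (N, S1, S2).
import Mathlib
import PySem

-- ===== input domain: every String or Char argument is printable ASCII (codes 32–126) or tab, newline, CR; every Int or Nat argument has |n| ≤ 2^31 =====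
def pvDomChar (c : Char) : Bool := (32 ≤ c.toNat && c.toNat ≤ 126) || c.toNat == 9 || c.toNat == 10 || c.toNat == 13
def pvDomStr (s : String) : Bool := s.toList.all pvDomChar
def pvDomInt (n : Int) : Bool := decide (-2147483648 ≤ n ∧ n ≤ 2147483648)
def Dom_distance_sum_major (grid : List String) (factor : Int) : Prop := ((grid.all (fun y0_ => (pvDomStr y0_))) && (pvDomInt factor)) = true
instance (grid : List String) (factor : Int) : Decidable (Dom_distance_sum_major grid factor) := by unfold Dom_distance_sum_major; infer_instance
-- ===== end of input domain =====

-- B replaces A's single pass of closed-form running aggregates by an explicit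
-- list of expanded galaxy coordinates plus a nested pairwise scan (objective:
-- alternative, a genuinely different algorithm of the same exactness).

-- ===== PORT A =====
def distance_sum_major (grid : List String) (factor : Int) : Int :=
  let st := grid.foldl (fun (st : Int × Int × Int × Int) row =>
      let n := PySem.Str.count row "#"
      let N := st.1 + (n : Int)
      let S1 := st.2.1 + (2 * N - (n : Int)) * (n : Int) * st.2.2.2
      let S2 := st.2.2.1 + (n : Int) * st.2.2.2
      let y := st.2.2.2 + (if n == 0 then factor else 1)
      (N, S1, S2, y)) (0, 0, 0, 0)
  st.2.1 - st.1 * st.2.2.1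

-- ===== PORT B =====
-- inner 'for d in coords[i+1:]' / outer 'for i, c in enumerate(coords)' of Source B:
-- at step i the slice coords[i+1:] is exactly the remaining tail.
def dsmPairLoop : List Int → Int → Int
  | [], total => total
  | c :: rest, total => dsmPairLoop rest (rest.foldl (fun t d => t + (d - c)) total)

def distance_sum_major_alt (grid : List String) (factor : Int) : Int :=
  let coords := (grid.foldl (fun (st : List Int × Int) row =>
      let n := PySem.Str.count row "#"
      (st.1 ++ List.replicate n st.2, st.2 + (if n == 0 then factor else 1))) ([], 0)).1
  dsmPairLoop coords 0

-- ===== PRECONDITION & SPEC =====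
def Spec_distance_sum_major (grid : List String) (factor : Int) (out : Int) : Prop := out = distance_sum_major_alt grid factor
instance (grid : List String) (factor : Int) (out : Int) : Decidable (Spec_distance_sum_major grid factor out) := by unfold Spec_distance_sum_major; infer_instance

-- ===== CLAIM (what is proved, stated in full; the proofs are below) =====
def Claim_equal_distance_sum_major : Prop := ∀ (grid : List String) (factor : Int), Dom_distance_sum_major grid factor → Spec_distance_sum_major grid factor (distance_sum_major grid factor)

-- ===== LEMMAS AND PROOFS =====

def dsmPairSum : List Int → Int
  | [] => 0
  | c :: cs => (cs.foldl (fun t d => t + (d - c)) 0) + dsmPairSum cs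

def dsmBuild (factor : Int) : List String → Int → List Int
  | [], _ => []
  | row :: rest, y =>
    let n := PySem.Str.count row "#"
    List.replicate n y ++ dsmBuild factor rest (y + (if n == 0 then factor else 1))

theorem dsm_foldl_sub (c : Int) (l : List Int) : ∀ t : Int,
    l.foldl (fun t d => t + (d - c)) t = t + l.sum - (l.length : Int) * c := by
  induction l with
  | nil => intro t; simp
  | cons a l ih =>
    intro t
    rw [List.foldl_cons, ih]
    simp only [List.length_cons, List.sum_cons]
    push_cast; ring

theorem dsm_pairLoop_eq (l : List Int) : ∀ t : Int, dsmPairLoop l t = t + dsmPairSum l := by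
  induction l with
  | nil => intro t; simp [dsmPairLoop, dsmPairSum]
  | cons c cs ih =>
    intro t
    rw [dsmPairLoop, ih, dsmPairSum, dsm_foldl_sub, dsm_foldl_sub]
    ring

theorem dsm_pairSum_replicate (y : Int) : ∀ n : Nat, dsmPairSum (List.replicate n y) = 0 := by
  intro n
  induction n with
  | zero => simp [dsmPairSum]
  | succ m ih =>
    rw [List.replicate_succ, dsmPairSum, ih, dsm_foldl_sub]
    simp

theorem dsm_pairSum_append_replicate (n : Nat) (y : Int) : ∀ acc : List Int,
    dsmPairSum (acc ++ List.replicate n y)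
      = dsmPairSum acc + (n : Int) * ((acc.length : Int) * y - acc.sum) := by
  intro acc
  induction acc with
  | nil => simp [dsmPairSum, dsm_pairSum_replicate]
  | cons c cs ih =>
    rw [List.cons_append, dsmPairSum, dsmPairSum, ih, dsm_foldl_sub, dsm_foldl_sub]
    simp only [List.sum_append, List.sum_replicate, List.length_append, List.length_cons,
      List.sum_cons, List.length_replicate]
    push_cast; ring

theorem dsm_coords_eq (factor : Int) (grid : List String) : ∀ (acc : List Int) (y : Int),
    (grid.foldl (fun (st : List Int × Int) row =>
      let n := PySem.Str.count row "#"
      (st.1 ++ List.replicate n st.2, st.2 + (if n == 0 then factor else 1))) (acc, y)).1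
    = acc ++ dsmBuild factor grid y := by
  induction grid with
  | nil => intro acc y; simp [dsmBuild]
  | cons row rest ih =>
    intro acc y
    rw [List.foldl_cons, ih, dsmBuild]
    simp

theorem dsm_main (factor : Int) (grid : List String) : ∀ (acc : List Int) (S1 y : Int),
    dsmPairSum (acc ++ dsmBuild factor grid y)
      = dsmPairSum acc - (S1 - (acc.length : Int) * acc.sum)
        + (let st := grid.foldl (fun (st : Int × Int × Int × Int) row =>
              let n := PySem.Str.count row "#"
              let N := st.1 + (n : Int)
              let S1 := st.2.1 + (2 * N - (n : Int)) * (n : Int) * st.2.2.2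
              let S2 := st.2.2.1 + (n : Int) * st.2.2.2
              let y := st.2.2.2 + (if n == 0 then factor else 1)
              (N, S1, S2, y)) ((acc.length : Int), S1, acc.sum, y)
           st.2.1 - st.1 * st.2.2.1) := by
  induction grid with
  | nil => intro acc S1 y; simp [dsmBuild]
  | cons row rest ih =>
    intro acc S1 y
    rw [dsmBuild, List.foldl_cons]
    have hlen : ((acc ++ List.replicate (PySem.Str.count row "#") y).length : Int)
        = (acc.length : Int) + (PySem.Str.count row "#" : Int) := by
      simp
    have hsum : (acc ++ List.replicate (PySem.Str.count row "#") y).sum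
        = acc.sum + (PySem.Str.count row "#" : Int) * y := by
      simp [List.sum_append, List.sum_replicate]
    have h := ih (acc ++ List.replicate (PySem.Str.count row "#") y)
        (S1 + (2 * ((acc.length : Int) + (PySem.Str.count row "#" : Int)) - (PySem.Str.count row "#" : Int))
            * (PySem.Str.count row "#" : Int) * y)
        (y + (if PySem.Str.count row "#" == 0 then factor else 1))
    rw [hlen, hsum] at h
    rw [← List.append_assoc, h, dsm_pairSum_append_replicate]
    ring_nf

-- ===== VERDICT (by name: the statement is the Claim_ definition above) =====
theorem distance_sum_major_spec : Claim_equal_distance_sum_major := by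
  intro grid factor _
  unfold Spec_distance_sum_major distance_sum_major distance_sum_major_alt
  rw [dsm_coords_eq, dsm_pairLoop_eq]
  have h := dsm_main factor grid [] 0 0
  simp [dsmPairSum] at h
  simp [h]
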